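-- pv_equiv track=rewrite | github.com/A7medgGm/stockbot | bot.py | products_keyboard
-- ===== SOURCE A (Python) =====
-- def products_keyboard(inventory, callback_prefix="inv"):
--     buttons = []
--     items = list(inventory.keys())
--     for i in range(0, len(items), 2):
--         row = [{"text": items[i], "callback_data": f"{callback_prefix}:{items[i]}"}]
--         if i + 1 < len(items):
--             row.append({"text": items[i+1], "callback_data": f"{callback_prefix}:{items[i+1]}"})
--         buttons.append(row)
--     buttons.append([{"text": "🔙 رجوع", "callback_data": "main_menu"}])
--     return buttons
-- ===== SOURCE B (Python) =====
-- def products_keyboard(inventory, callback_prefix="inv"):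
--     # map pass: one flat button per key, then peel rows of two off the front
--     flat = [{"text": k, "callback_data": f"{callback_prefix}:{k}"} for k in inventory]
--     rows = []
--     while flat:
--         rows.append(flat[:2])
--         flat = flat[2:]
--     rows.append([{"text": "🔙 رجوع", "callback_data": "main_menu"}])
--     return rows
-- ===== Notes on version B (the rewrite author's own statement) =====
-- stated objective: simpler
-- what changed: Replaces A's index loop over range(0,len,2) with its i+1<len odd-tail branch by a map pass building one flat button list and a branch-free chunking pass that peels rows of two off the front with slicing.
import Mathlib
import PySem

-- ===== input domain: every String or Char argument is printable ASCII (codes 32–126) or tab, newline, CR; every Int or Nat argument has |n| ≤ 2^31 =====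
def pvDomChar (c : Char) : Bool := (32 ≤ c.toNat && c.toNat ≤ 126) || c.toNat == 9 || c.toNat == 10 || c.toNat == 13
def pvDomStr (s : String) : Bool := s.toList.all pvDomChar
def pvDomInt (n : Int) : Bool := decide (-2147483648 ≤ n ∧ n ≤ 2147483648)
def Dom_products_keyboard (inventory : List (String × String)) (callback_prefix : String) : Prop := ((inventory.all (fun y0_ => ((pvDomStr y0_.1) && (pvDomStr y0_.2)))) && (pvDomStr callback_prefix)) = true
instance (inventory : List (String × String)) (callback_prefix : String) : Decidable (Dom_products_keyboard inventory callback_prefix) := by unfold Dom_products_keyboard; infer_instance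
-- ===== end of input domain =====

-- B replaces A's indexed loop with odd-tail branch by a map pass followed by peeling rows of two (simpler decomposition).


-- ===== PORT A =====
def products_keyboard (inventory : List (String × String)) (callback_prefix : String) : List (List (List (String × String))) :=
  let items := PySem.List.dedup (inventory.map Prod.fst)
  let buttons : List (List (List (String × String))) :=
    (PySem.List.pyRange 0 (items.length : Int) 2).foldl
      (fun buttons i =>
        let row := [[("text", PySem.List.pyGetD items i ""),
                     ("callback_data", callback_prefix ++ ":" ++ PySem.List.pyGetD items i "")]]
        let row := if i + 1 < (items.length : Int)
          then row ++ [[("text", PySem.List.pyGetD items (i + 1) ""),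
                        ("callback_data", callback_prefix ++ ":" ++ PySem.List.pyGetD items (i + 1) "")]]
          else row
        buttons ++ [row]) []
  buttons ++ [[[("text", "🔙 رجوع"), ("callback_data", "main_menu")]]]

-- ===== PORT B =====
-- the while-loop of Source B: rows.append(flat[:2]); flat = flat[2:]
def pvChunk2 {α : Type} : List α → List (List α)
  | [] => []
  | [x] => [[x]]
  | x :: y :: rest => [x, y] :: pvChunk2 rest

def products_keyboard_alt (inventory : List (String × String)) (callback_prefix : String) : List (List (List (String × String))) :=
  let flat := (PySem.List.dedup (inventory.map Prod.fst)).map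
    (fun k => [("text", k), ("callback_data", callback_prefix ++ ":" ++ k)])
  pvChunk2 flat ++ [[[("text", "🔙 رجوع"), ("callback_data", "main_menu")]]]

-- ===== PRECONDITION & SPEC =====
def Spec_products_keyboard (inventory : List (String × String)) (callback_prefix : String) (out : List (List (List (String × String)))) : Prop := out = products_keyboard_alt inventory callback_prefix
instance (inventory : List (String × String)) (callback_prefix : String) (out : List (List (List (String × String)))) : Decidable (Spec_products_keyboard inventory callback_prefix out) := by unfold Spec_products_keyboard; infer_instance

-- ===== CLAIM (what is proved, stated in full; the proofs are below) =====
def Claim_equal_products_keyboard : Prop := ∀ (inventory : List (String × String)) (callback_prefix : String), Dom_products_keyboard inventory callback_prefix → Spec_products_keyboard inventory callback_prefix (products_keyboard inventory callback_prefix)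

-- ===== LEMMAS AND PROOFS =====

theorem pvPyRange_two_nil (a b : Int) (h : b ≤ a) : PySem.List.pyRange a b 2 = [] := by
  rw [PySem.List.pyRange_of_pos a b (by norm_num)]
  simp [if_neg (not_lt.2 h)]

theorem pvPyRange_two_cons (a b : Int) (h : a < b) :
    PySem.List.pyRange a b 2 = a :: PySem.List.pyRange (a + 2) b 2 := by
  rw [PySem.List.pyRange_of_pos a b (by norm_num), PySem.List.pyRange_of_pos (a + 2) b (by norm_num)]
  rw [if_pos h]
  by_cases h2 : a + 2 < b
  · rw [if_pos h2]
    have hcnt : ((b - a + 2 - 1) / 2).toNat = ((b - (a + 2) + 2 - 1) / 2).toNat + 1 := by omega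
    rw [hcnt, List.range_succ_eq_map]
    simp [List.map_map, Function.comp]
    intro k _
    ring
  · rw [if_neg h2]
    have hcnt : ((b - a + 2 - 1) / 2).toNat = 1 := by omega
    rw [hcnt]
    simp

theorem pvPyRange_two_shift (n : Int) :
    PySem.List.pyRange 2 (n + 2) 2 = (PySem.List.pyRange 0 n 2).map (fun i => i + 2) := by
  rw [PySem.List.pyRange_of_pos 2 (n + 2) (by norm_num), PySem.List.pyRange_of_pos 0 n (by norm_num)]
  by_cases hn : 0 < n
  · rw [if_pos (by omega), if_pos hn]
    have hcnt : ((n + 2 - 2 + 2 - 1) / 2).toNat = ((n - 0 + 2 - 1) / 2).toNat := by omega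
    rw [hcnt, List.map_map]
    apply List.map_congr_left
    intro k _
    simp [Function.comp]
    ring
  · rw [if_neg (by omega), if_neg hn]
    simp

theorem pvGetD_cons2 {α : Type} (a b : α) (t : List α) (k : Int) (hk : 0 ≤ k) (d : α) :
    PySem.List.pyGetD (a :: b :: t) (k + 2) d = PySem.List.pyGetD t k d := by
  obtain ⟨m, rfl⟩ := Int.eq_ofNat_of_zero_le hk
  have : (m : Int) + 2 = ((m + 2 : Nat) : Int) := by push_cast; ring
  rw [this, PySem.List.pyGetD_natCast, PySem.List.pyGetD_natCast]
  simp [List.getD]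

theorem pvLoop_eq {α : Type} (bf : String → α) (ks : List String) (init : List (List α)) :
    (PySem.List.pyRange 0 (ks.length : Int) 2).foldl
      (fun buttons i =>
        buttons ++ [if i + 1 < (ks.length : Int)
          then [bf (PySem.List.pyGetD ks i ""), bf (PySem.List.pyGetD ks (i + 1) "")]
          else [bf (PySem.List.pyGetD ks i "")]]) init
    = init ++ pvChunk2 (ks.map bf) := by
  induction ks using pvChunk2.induct generalizing init with
  | case1 =>
      simp [pvPyRange_two_nil 0 0 le_rfl, pvChunk2]
  | case2 x =>
      rw [show ((([x] : List String).length : Int)) = 1 by simp]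
      rw [pvPyRange_two_cons 0 1 (by norm_num), show (0 : Int) + 2 = 2 by norm_num,
        pvPyRange_two_nil 2 1 (by norm_num)]
      simp [pvChunk2, PySem.List.pyGetD]
  | case3 x y rest ih =>
      have hlen : (((x :: y :: rest : List String).length : Int)) = (rest.length : Int) + 2 := by
        simp; ring
      rw [hlen]
      rw [pvPyRange_two_cons 0 ((rest.length : Int) + 2) (by omega)]
      rw [show (0 : Int) + 2 = 2 by norm_num, pvPyRange_two_shift]
      rw [List.foldl_cons, List.foldl_map]
      have hrow0 : (if (0 : Int) + 1 < (rest.length : Int) + 2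
          then [bf (PySem.List.pyGetD (x :: y :: rest) 0 ""), bf (PySem.List.pyGetD (x :: y :: rest) (0 + 1) "")]
          else [bf (PySem.List.pyGetD (x :: y :: rest) 0 "")])
          = [bf x, bf y] := by
        rw [if_pos (by omega)]
        norm_num [PySem.List.pyGetD]
      rw [hrow0]
      rw [PySem.List.foldl_congr_mem _ _
        (fun buttons i =>
          buttons ++ [if i + 1 < (rest.length : Int)
            then [bf (PySem.List.pyGetD rest i ""), bf (PySem.List.pyGetD rest (i + 1) "")]
            else [bf (PySem.List.pyGetD rest i "")]]) _ ?_]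
      · rw [ih]
        simp [pvChunk2]
      · intro acc i hi
        have hi0 : 0 ≤ i := by
          rcases (PySem.List.mem_pyRange_iff_of_pos (by norm_num) i).1 hi with ⟨h1, _, _⟩
          exact h1
        have e1 : PySem.List.pyGetD (x :: y :: rest) (i + 2) "" = PySem.List.pyGetD rest i "" :=
          pvGetD_cons2 x y rest i hi0 ""
        have e2 : PySem.List.pyGetD (x :: y :: rest) (i + 2 + 1) "" = PySem.List.pyGetD rest (i + 1) "" := by
          rw [show i + 2 + 1 = (i + 1) + 2 by ring]
          exact pvGetD_cons2 x y rest (i + 1) (by omega) ""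
        have e3 : (i + 2 + 1 < (rest.length : Int) + 2) ↔ (i + 1 < (rest.length : Int)) := by omega
        rw [e1, e2]
        simp [e3]

-- ===== VERDICT (by name: the statement is the Claim_ definition above) =====
theorem products_keyboard_spec : Claim_equal_products_keyboard := by
  intro inventory callback_prefix _
  unfold Spec_products_keyboard
  exact congrArg (fun z => z ++ [[[("text", "🔙 رجوع"), ("callback_data", "main_menu")]]])
    (pvLoop_eq (fun k => [("text", k), ("callback_data", callback_prefix ++ ":" ++ k)])
      (PySem.List.dedup (inventory.map Prod.fst)) [])
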